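-- pv_equiv track=rewrite | github.com/GaloisTheory/global-cot-analysis | src/chunking.py | _merge_by_yes_runs
-- ===== SOURCE A (Python) =====
-- def _merge_by_yes_runs(chunks: list[str], yes_pairs: list[bool]) -> list[str]:
--     if not yes_pairs:
--         return chunks
--     n = len(chunks)
--     out: list[str] = []
--     i = 0
--     while i < n:
--         if i < n - 1 and yes_pairs[i]:
--             j = i
--             while j < n - 1 and yes_pairs[j]:
--                 j += 1
--             merged = " ".join(chunks[i : j + 1])
--             out.append(merged)
--             i = j + 1
--         else:
--             out.append(chunks[i])
--             i += 1
--     return out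
-- ===== SOURCE B (Python) =====
-- def _merge_by_yes_runs(chunks: list[str], yes_pairs: list[bool]) -> list[str]:
--     if not yes_pairs:
--         return chunks
--     if not chunks:
--         return []
--     groups = [[chunks[0]]]
--     for i in range(1, len(chunks)):
--         if yes_pairs[i - 1]:
--             groups[-1].append(chunks[i])
--         else:
--             groups.append([chunks[i]])
--     return [" ".join(g) for g in groups]
-- ===== Notes on version B (the rewrite author's own statement) =====
-- stated objective: simpler
-- what changed: Replaced A's index-based while loop with an inner run-scanning pointer and slice-join by a single forward grouping pass that appends each chunk to the current group or starts a new one, followed by a separate join pass over the groups.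
import Mathlib
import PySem

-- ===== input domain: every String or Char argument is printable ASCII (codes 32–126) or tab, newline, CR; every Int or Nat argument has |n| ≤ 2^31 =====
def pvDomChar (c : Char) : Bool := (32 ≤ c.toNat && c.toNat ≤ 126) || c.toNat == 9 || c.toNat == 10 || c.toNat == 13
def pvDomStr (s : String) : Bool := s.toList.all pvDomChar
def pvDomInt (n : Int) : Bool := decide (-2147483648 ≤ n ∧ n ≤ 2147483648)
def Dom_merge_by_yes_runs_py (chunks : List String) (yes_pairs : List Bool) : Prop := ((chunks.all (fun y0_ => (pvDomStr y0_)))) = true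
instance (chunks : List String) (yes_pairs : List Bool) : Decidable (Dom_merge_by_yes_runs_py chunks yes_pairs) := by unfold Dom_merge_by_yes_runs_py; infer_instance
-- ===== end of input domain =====

-- B replaces A's while-loop with an inner run-scanning pointer by a forward grouping
-- pass (list of groups) plus a separate join pass; objective: simpler. Return value only.

-- ===== PORT A =====
-- " ".join(xs)
def pvJoinSp (xs : List String) : String := PySem.Str.join " " xs

-- inner 'while j < n - 1 and yes_pairs[j]: j += 1' (getD: in range whenever Python returns)
def pvAScan (yes : List Bool) (n j : Nat) : Nat :=
  if h : j < n - 1 ∧ yes.getD j false = true then pvAScan yes n (j + 1) else j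
  termination_by n - j
  decreasing_by omega

theorem pvAScan_ge (yes : List Bool) (n j : Nat) : j ≤ pvAScan yes n j := by
  fun_induction pvAScan yes n j with
  | case1 j h ih => omega
  | case2 j h => omega

-- outer 'while i < n' loop of A
def pvALoop (chunks : List String) (yes : List Bool) (n i : Nat) (out : List String) : List String :=
  if hi : i < n then
    if i < n - 1 ∧ yes.getD i false = true then
      let j := pvAScan yes n i
      pvALoop chunks yes n (j + 1)
        (out ++ [pvJoinSp (PySem.List.slice chunks (some (i : Int)) (some ((j + 1 : Nat) : Int)))])
    else
      pvALoop chunks yes n (i + 1) (out ++ [chunks.getD i ""])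
  else out
  termination_by n - i
  decreasing_by
  · have := pvAScan_ge yes n i; omega
  · omega

def merge_by_yes_runs_py (chunks : List String) (yes_pairs : List Bool) : List String :=
  if yes_pairs = [] then chunks
  else pvALoop chunks yes_pairs chunks.length 0 []

-- ===== PORT B =====
-- groups[-1].append(x)
def pvAppendLast (groups : List (List String)) (x : String) : List (List String) :=
  groups.dropLast ++ [groups.getLastD [] ++ [x]]

-- 'for i in range(1, len(chunks))' of B
def pvBLoop (chunks : List String) (yes : List Bool) (n i : Nat) (groups : List (List String)) :
    List (List String) :=
  if i < n then
    if yes.getD (i - 1) false = true then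
      pvBLoop chunks yes n (i + 1) (pvAppendLast groups (chunks.getD i ""))
    else
      pvBLoop chunks yes n (i + 1) (groups ++ [[chunks.getD i ""]])
  else groups
  termination_by n - i

def merge_by_yes_runs_py_alt (chunks : List String) (yes_pairs : List Bool) : List String :=
  if yes_pairs = [] then chunks
  else if chunks = [] then []
  else (pvBLoop chunks yes_pairs chunks.length 1 [[chunks.getD 0 ""]]).map pvJoinSp

-- ===== PRECONDITION & SPEC =====
-- Pre_ excludes exactly the inputs where Python A raises IndexError: yes_pairs nonempty
-- but shorter than len(chunks) - 1 (B raises there too).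
def Pre_merge_by_yes_runs_py (chunks : List String) (yes_pairs : List Bool) : Prop :=
  yes_pairs = [] ∨ chunks.length ≤ yes_pairs.length + 1
instance (chunks : List String) (yes_pairs : List Bool) : Decidable (Pre_merge_by_yes_runs_py chunks yes_pairs) := by unfold Pre_merge_by_yes_runs_py; infer_instance

def pvWitness_merge_by_yes_runs_py : List String × List Bool := (["a", "b", "c"], [true, false])

def Spec_merge_by_yes_runs_py (chunks : List String) (yes_pairs : List Bool) (out : List String) : Prop := out = merge_by_yes_runs_py_alt chunks yes_pairs
instance (chunks : List String) (yes_pairs : List Bool) (out : List String) : Decidable (Spec_merge_by_yes_runs_py chunks yes_pairs out) := by unfold Spec_merge_by_yes_runs_py; infer_instance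

-- ===== CLAIM (what is proved, stated in full; the proofs are below) =====
def Claim_equal_merge_by_yes_runs_py : Prop := ∀ (chunks : List String) (yes_pairs : List Bool), Dom_merge_by_yes_runs_py chunks yes_pairs → Pre_merge_by_yes_runs_py chunks yes_pairs → Spec_merge_by_yes_runs_py chunks yes_pairs (merge_by_yes_runs_py chunks yes_pairs)

-- ===== LEMMAS AND PROOFS =====

-- common reference: attach the remaining chunks to the open group g, ys holds the
-- connecting flag of each remaining chunk (headD false ≙ getD default of the ports)
def pvAtt : List String → List Bool → List String → List (List String)
  | [], _, g => [g]
  | c :: cs, ys, g =>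
      if ys.headD false then pvAtt cs ys.tail (g ++ [c]) else g :: pvAtt cs ys.tail [c]

def pvGr : List String → List Bool → List (List String)
  | [], _ => []
  | c :: cs, ys => pvAtt cs ys [c]

theorem pvJoinSp_singleton (c : String) : pvJoinSp [c] = c := by
  simp [pvJoinSp, PySem.Str.join, PySem.Chars.join_singleton]

theorem pv_headD_drop (ys : List Bool) (k : Nat) : (ys.drop k).headD false = ys.getD k false := by
  simp [List.headD_eq_head?_getD, List.head?_drop, List.getD]

theorem pv_tail_drop (ys : List Bool) (k : Nat) : (ys.drop k).tail = ys.drop (k + 1) := by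
  rw [List.tail_drop]

theorem pv_drop_eq_cons (xs : List String) (k : Nat) (h : k < xs.length) :
    xs.drop k = xs.getD k "" :: xs.drop (k + 1) := by
  rw [List.drop_eq_getElem_cons h]
  simp [List.getD, List.getElem?_eq_getElem h]

-- pvAScan facts
theorem pvAScan_lt (yes : List Bool) (n i : Nat)
    (h : i < n - 1 ∧ yes.getD i false = true) : i < pvAScan yes n i := by
  rw [pvAScan, dif_pos h]
  have := pvAScan_ge yes n (i + 1); omega

theorem pvAScan_le (yes : List Bool) (n j : Nat) (h : j ≤ n - 1) : pvAScan yes n j ≤ n - 1 := by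
  fun_induction pvAScan yes n j with
  | case1 j h' ih => exact ih (by omega)
  | case2 j h' => omega

theorem pvAScan_run (yes : List Bool) (n j : Nat) :
    ∀ k, j ≤ k → k < pvAScan yes n j → yes.getD k false = true := by
  fun_induction pvAScan yes n j with
  | case1 j h ih =>
      intro k hk1 hk2
      rcases Nat.eq_or_lt_of_le hk1 with rfl | h'
      · exact h.2
      · exact ih k h' hk2
  | case2 j h => intro k hk1 hk2; omega

theorem pvAScan_stop (yes : List Bool) (n j : Nat) :
    ¬ (pvAScan yes n j < n - 1 ∧ yes.getD (pvAScan yes n j) false = true) := by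
  fun_induction pvAScan yes n j with
  | case1 j h ih => exact ih
  | case2 j h => exact h

-- the run i..j of true flags is one group of pvGr
theorem pv_att_run (chunks : List String) (yes : List Bool) (j : Nat)
    (hj : ¬ (j < chunks.length - 1 ∧ yes.getD j false = true))
    (hjle : j ≤ chunks.length - 1) :
    ∀ i g, i < chunks.length → i ≤ j →
      (∀ k, i ≤ k → k < j → yes.getD k false = true) →
      pvAtt (chunks.drop (i + 1)) (yes.drop i) g
        = (g ++ (chunks.drop (i + 1)).take (j - i)) :: pvGr (chunks.drop (j + 1)) (yes.drop (j + 1)) := by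
  intro i g hi hij hrun
  induction hd : j - i generalizing i g with
  | zero =>
      have : i = j := by omega
      subst this
      rcases Nat.lt_or_ge (i + 1) chunks.length with h1 | h1
      · -- flag i is false (else hj contradicted, since i < length - 1)
        have hflag : yes.getD i false = false := by
          by_contra hc
          exact hj ⟨by omega, by simpa using Bool.of_not_eq_false hc⟩
        rw [pv_drop_eq_cons chunks (i + 1) h1]
        simp only [pvAtt, pv_headD_drop, hflag, Bool.false_eq_true, if_false, pv_tail_drop]
        rw [← pv_drop_eq_cons chunks (i + 1) h1]
        simp only [List.take_zero, List.append_nil]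
        rw [pv_drop_eq_cons chunks (i + 1) h1]
        simp [pvGr]
      · -- i is the last chunk
        have h2 : chunks.drop (i + 1) = [] := List.drop_eq_nil_of_le h1
        have h3 : chunks.drop (i + 1 + 1) = [] := List.drop_eq_nil_of_le (by omega)
        simp [h2, h3, pvAtt, pvGr.eq_def]
  | succ m ihm =>
      have hij' : i < j := by omega
      have h1 : i + 1 < chunks.length := by omega
      rw [pv_drop_eq_cons chunks (i + 1) h1]
      simp only [pvAtt, pv_headD_drop, hrun i le_rfl hij', if_true, pv_tail_drop]
      rw [ihm (i + 1) (g ++ [chunks.getD (i + 1) ""]) h1 (by omega)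
        (fun k hk1 hk2 => hrun k (by omega) hk2) (by omega)]
      simp [List.take_succ_cons]

-- PORT A computes pvGr joined
theorem pvALoop_eq (chunks : List String) (yes : List Bool) :
    ∀ i out, i ≤ chunks.length →
      pvALoop chunks yes chunks.length i out
        = out ++ (pvGr (chunks.drop i) (yes.drop i)).map pvJoinSp := by
  have main : ∀ d i out, chunks.length - i ≤ d → i ≤ chunks.length →
      pvALoop chunks yes chunks.length i out
        = out ++ (pvGr (chunks.drop i) (yes.drop i)).map pvJoinSp := by
    intro d
    induction d with
    | zero =>
        intro i out hd hi
        have : i = chunks.length := by omega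
        subst this
        rw [pvALoop, dif_neg (by omega)]
        simp [pvGr]
    | succ m ihm =>
        intro i out hd hi
        rcases Nat.eq_or_lt_of_le hi with rfl | hlt
        · rw [pvALoop, dif_neg (by omega)]
          simp [pvGr]
        · rw [pvALoop, dif_pos hlt]
          by_cases hc : i < chunks.length - 1 ∧ yes.getD i false = true
          · rw [if_pos hc]
            have hij : i < pvAScan yes chunks.length i := pvAScan_lt yes chunks.length i hc
            have hjle : pvAScan yes chunks.length i ≤ chunks.length - 1 :=
              pvAScan_le yes chunks.length i (by omega)
            have hstop := pvAScan_stop yes chunks.length i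
            have hrun := pvAScan_run yes chunks.length i
            set j := pvAScan yes chunks.length i with hjdef
            have hatt := pv_att_run chunks yes j hstop hjle i
              [chunks.getD i ""] hlt (by omega) (fun k hk1 hk2 => hrun k hk1 hk2)
            rw [ihm (j + 1) _ (by omega) (by omega)]
            rw [pv_drop_eq_cons chunks i hlt]
            simp only [pvGr]
            rw [hatt]
            have hslice : PySem.List.slice chunks (some (i : Int)) (some ((j + 1 : Nat) : Int))
                = chunks.getD i "" :: (chunks.drop (i + 1)).take (j - i) := by
              rw [PySem.List.slice_natCast]
              rw [pv_drop_eq_cons chunks i hlt]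
              simp [show j + 1 - i = (j - i) + 1 by omega]
            push_cast at hslice
            simp [hslice, pvGr.eq_def, List.getD]
          · rw [if_neg hc]
            rw [ihm (i + 1) _ (by omega) (by omega)]
            rw [pv_drop_eq_cons chunks i hlt]
            simp only [pvGr]
            rcases Nat.lt_or_ge (i + 1) chunks.length with h1 | h1
            · -- not last chunk, so flag i is false
              have hflag : yes.getD i false = false := by
                by_contra hcf
                exact hc ⟨by omega, by simpa using Bool.of_not_eq_false hcf⟩
              rw [pv_drop_eq_cons chunks (i + 1) h1]
              simp only [pvAtt, pv_headD_drop, hflag, Bool.false_eq_true, if_false, pv_tail_drop]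
              simp [pvJoinSp_singleton]
            · have h2 : chunks.drop (i + 1) = [] := List.drop_eq_nil_of_le h1
              simp [h2, pvAtt, pvJoinSp_singleton]
  intro i out hi
  exact main (chunks.length - i) i out le_rfl hi

-- groups[-1].append on a nonempty group list
theorem pvAppendLast_snoc (gs : List (List String)) (g : List String) (x : String) :
    pvAppendLast (gs ++ [g]) x = gs ++ [g ++ [x]] := by
  simp [pvAppendLast]

-- PORT B computes pvAtt
theorem pvBLoop_eq (chunks : List String) (yes : List Bool) :
    ∀ i gs g, 1 ≤ i → i ≤ chunks.length →
      pvBLoop chunks yes chunks.length i (gs ++ [g])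
        = gs ++ pvAtt (chunks.drop i) (yes.drop (i - 1)) g := by
  intro i gs g h1 hi
  induction hd : chunks.length - i generalizing i gs g with
  | zero =>
      have : i = chunks.length := by omega
      subst this
      rw [pvBLoop, if_neg (by omega)]
      simp [List.drop_eq_nil_of_le, pvAtt]
  | succ m ihm =>
      have hlt : i < chunks.length := by omega
      rw [pvBLoop, if_pos hlt]
      rw [pv_drop_eq_cons chunks i hlt]
      simp only [pvAtt, pv_headD_drop]
      have htail : (yes.drop (i - 1)).tail = yes.drop (i + 1 - 1) := by
        rw [pv_tail_drop]; congr 1; omega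
      by_cases hflag : yes.getD (i - 1) false = true
      · rw [if_pos hflag, hflag, if_pos rfl]
        rw [pvAppendLast_snoc]
        rw [ihm (i + 1) gs (g ++ [chunks.getD i ""]) (by omega) (by omega) (by omega)]
        rw [htail]
      · rw [if_neg hflag, Bool.of_not_eq_true hflag, if_neg (by simp)]
        rw [show gs ++ [g] ++ [[chunks.getD i ""]] = (gs ++ [g]) ++ [[chunks.getD i ""]] from rfl]
        rw [ihm (i + 1) (gs ++ [g]) [chunks.getD i ""] (by omega) (by omega) (by omega)]
        rw [htail]
        simp

-- ===== VERDICT (by name: the statement is the Claim_ definition above) =====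
theorem merge_by_yes_runs_py_spec : Claim_equal_merge_by_yes_runs_py := by
  intro chunks yes_pairs _ _
  unfold Spec_merge_by_yes_runs_py merge_by_yes_runs_py merge_by_yes_runs_py_alt
  by_cases hy : yes_pairs = []
  · simp [hy]
  · rw [if_neg hy, if_neg hy]
    rcases chunks with _ | ⟨c, cs⟩
    · simp [pvALoop]
    · rw [if_neg (by simp)]
      rw [pvALoop_eq (c :: cs) yes_pairs 0 [] (by omega)]
      have hb := pvBLoop_eq (c :: cs) yes_pairs 1 [] [c] (by omega) (by simp)
      rw [show [[(c :: cs).getD 0 ""]] = ([] : List (List String)) ++ [[c]] by simp [List.getD], hb]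
      simp [pvGr]
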